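-- pv_equiv track=rewrite | github.com/cesar-claros/ood_systematic | nc_csf_predictivity/evaluation/coefficients_heatmap_clique.py | order_features
-- ===== SOURCE A (Python) =====
-- NC_PRIMARY = [
--     "var_collapse", "equiangular_uc", "equiangular_wc",
--     "equinorm_uc", "equinorm_wc", "max_equiangular_uc",
--     "max_equiangular_wc", "self_duality",
-- ]
--
-- def order_features(present: list[str]) -> list[str]:
--     nc_order = [f for f in NC_PRIMARY if f in present]
--     nclass = [f for f in present if f == "n_classes"]
--     src = sorted([f for f in present if f.startswith("source_")])
--     reg = sorted([f for f in present if f.startswith("regime_")])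
--     rest = [f for f in present
--             if f not in nc_order and f not in nclass
--             and not f.startswith(("source_", "regime_"))]
--     return nc_order + nclass + src + reg + rest
-- ===== SOURCE B (Python) =====
-- NC_PRIMARY = [
--     "var_collapse", "equiangular_uc", "equiangular_wc",
--     "equinorm_uc", "equinorm_wc", "max_equiangular_uc",
--     "max_equiangular_wc", "self_duality",
-- ]
--
-- def order_features(present: list[str]) -> list[str]:
--     nc_primary_set = set(NC_PRIMARY)
--     nc_seen = set()
--     nclass, src, reg, rest = [], [], [], []
--     for f in present:
--         if f in nc_primary_set:
--             nc_seen.add(f)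
--         elif f == "n_classes":
--             nclass.append(f)
--         elif f.startswith("source_"):
--             src.append(f)
--         elif f.startswith("regime_"):
--             reg.append(f)
--         else:
--             rest.append(f)
--     src.sort()
--     reg.sort()
--     return [f for f in NC_PRIMARY if f in nc_seen] + nclass + src + reg + rest
-- ===== Notes on version B (the rewrite author's own statement) =====
-- stated objective: alternative
-- what changed: Replaced five separate filtering passes over `present` with a single bucketing loop that routes each element into one of five buckets via an if/elif priority chain (NC membership tracked in a set and re-ordered by NC_PRIMARY afterwards), so `present` is traversed once instead of five times.
import Mathlib
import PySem

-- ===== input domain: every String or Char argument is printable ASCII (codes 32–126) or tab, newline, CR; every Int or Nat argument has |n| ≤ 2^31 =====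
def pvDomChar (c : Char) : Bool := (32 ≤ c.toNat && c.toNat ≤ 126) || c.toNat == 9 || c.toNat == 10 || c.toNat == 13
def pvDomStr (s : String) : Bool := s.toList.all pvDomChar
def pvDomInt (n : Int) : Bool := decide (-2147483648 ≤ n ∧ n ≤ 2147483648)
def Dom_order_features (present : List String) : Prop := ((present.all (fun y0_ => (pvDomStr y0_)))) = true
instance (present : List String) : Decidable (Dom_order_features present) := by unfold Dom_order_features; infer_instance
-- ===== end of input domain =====

-- B replaces A's five filtering passes over `present` by a single bucketing pass (if/elif priority
-- chain); the theorems state only that the return values are equal on the stated domain.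

def ncPrimary : List String :=
  ["var_collapse", "equiangular_uc", "equiangular_wc",
   "equinorm_uc", "equinorm_wc", "max_equiangular_uc",
   "max_equiangular_wc", "self_duality"]

-- ===== PORT A =====
def order_features (present : List String) : List String :=
  let nc_order := ncPrimary.filter (fun f => present.contains f)
  let nclass := present.filter (fun f => f == "n_classes")
  let src := PySem.List.sorted (present.filter (fun f => PySem.Str.startswith f "source_")) (fun x => x) false
  let reg := PySem.List.sorted (present.filter (fun f => PySem.Str.startswith f "regime_")) (fun x => x) false
  let rest := present.filter (fun f =>
    !nc_order.contains f && !nclass.contains f &&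
    !(PySem.Str.startswith f "source_" || PySem.Str.startswith f "regime_"))
  nc_order ++ nclass ++ src ++ reg ++ rest

-- ===== PORT B =====
def ofAltStep (ncPrimarySet : PySem.Set String)
    (st : PySem.Set String × List String × List String × List String × List String)
    (f : String) : PySem.Set String × List String × List String × List String × List String :=
  let (seen, nclass, src, reg, rest) := st
  if ncPrimarySet.contains f then (PySem.Set.add seen f, nclass, src, reg, rest)
  else if f == "n_classes" then (seen, nclass ++ [f], src, reg, rest)
  else if PySem.Str.startswith f "source_" then (seen, nclass, src ++ [f], reg, rest)
  else if PySem.Str.startswith f "regime_" then (seen, nclass, src, reg ++ [f], rest)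
  else (seen, nclass, src, reg, rest ++ [f])

def order_features_alt (present : List String) : List String :=
  let ncPrimarySet : PySem.Set String := PySem.Set.ofList ncPrimary
  let (seen, nclass, src, reg, rest) :=
    present.foldl (ofAltStep ncPrimarySet) (PySem.Set.empty, [], [], [], [])
  (ncPrimary.filter (fun f => seen.contains f)) ++ nclass ++
    PySem.List.sorted src (fun x => x) false ++
    PySem.List.sorted reg (fun x => x) false ++ rest

-- ===== PRECONDITION & SPEC =====
def Spec_order_features (present : List String) (out : List String) : Prop := out = order_features_alt present
instance (present : List String) (out : List String) : Decidable (Spec_order_features present out) := by unfold Spec_order_features; infer_instance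

-- ===== CLAIM (what is proved, stated in full; the proofs are below) =====
def Claim_equal_order_features : Prop := ∀ (present : List String), Dom_order_features present → Spec_order_features present (order_features present)

-- ===== LEMMAS AND PROOFS =====

-- The four bucket-membership tests of B, written as the predicates left by the fold expansion.
def q1 (f : String) : Bool := !(PySem.Set.ofList ncPrimary).contains f && (f == "n_classes")
def q2 (f : String) : Bool := !(PySem.Set.ofList ncPrimary).contains f && !(f == "n_classes") && PySem.Str.startswith f "source_"
def q3 (f : String) : Bool := !(PySem.Set.ofList ncPrimary).contains f && !(f == "n_classes") && !(PySem.Str.startswith f "source_") && PySem.Str.startswith f "regime_"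
def q4 (f : String) : Bool := !(PySem.Set.ofList ncPrimary).contains f && !(f == "n_classes") && !(PySem.Str.startswith f "source_") && !(PySem.Str.startswith f "regime_")

theorem nc_cases (f : String) (h : (PySem.Set.ofList ncPrimary).contains f = true) :
    f ∈ ncPrimary := by
  have := (PySem.Set.contains_iff _ _).mp h
  simpa [PySem.Set.mem_ofList] using this

-- the fold unzipped into five independent accumulations
theorem fold_expand (xs : List String)
    (s : PySem.Set String) (a b c d : List String) :
    xs.foldl (ofAltStep (PySem.Set.ofList ncPrimary)) (s, a, b, c, d) =
      (xs.foldl (fun t f => if (PySem.Set.ofList ncPrimary).contains f then PySem.Set.add t f else t) s,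
       a ++ xs.filter q1, b ++ xs.filter q2, c ++ xs.filter q3, d ++ xs.filter q4) := by
  induction xs generalizing s a b c d with
  | nil => simp
  | cons x t ih =>
    simp only [List.foldl_cons, List.filter_cons, ofAltStep]
    by_cases h1 : (PySem.Set.ofList ncPrimary).contains x = true
    · have e1 : q1 x = false := by unfold q1; rw [h1]; rfl
      have e2 : q2 x = false := by unfold q2; rw [h1]; rfl
      have e3 : q3 x = false := by unfold q3; rw [h1]; rfl
      have e4 : q4 x = false := by unfold q4; rw [h1]; rfl
      rw [if_pos h1, if_pos h1, ih, e1, e2, e3, e4]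
      simp
    · have h1' : (PySem.Set.ofList ncPrimary).contains x = false := by
        cases hc : (PySem.Set.ofList ncPrimary).contains x
        · rfl
        · exact absurd hc h1
      rw [if_neg h1, if_neg h1]
      by_cases h2 : (x == "n_classes") = true
      · have e1 : q1 x = true := by unfold q1; rw [h1', h2]; rfl
        have e2 : q2 x = false := by unfold q2; rw [h2]; simp
        have e3 : q3 x = false := by unfold q3; rw [h2]; simp
        have e4 : q4 x = false := by unfold q4; rw [h2]; simp
        rw [if_pos h2, ih, e1, e2, e3, e4]
        simp
      · have h2' : (x == "n_classes") = false := by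
          cases hc : (x == "n_classes")
          · rfl
          · exact absurd hc h2
        rw [if_neg h2]
        by_cases h3 : PySem.Str.startswith x "source_" = true
        · have e1 : q1 x = false := by unfold q1; rw [h2']; simp
          have e2 : q2 x = true := by unfold q2; rw [h1', h2', h3]; rfl
          have e3 : q3 x = false := by unfold q3; rw [h3]; simp
          have e4 : q4 x = false := by unfold q4; rw [h3]; simp
          rw [if_pos h3, ih, e1, e2, e3, e4]
          simp
        · have h3' : PySem.Str.startswith x "source_" = false := by
            cases hc : PySem.Str.startswith x "source_"
            · rfl
            · exact absurd hc h3
          rw [if_neg h3]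
          by_cases h4 : PySem.Str.startswith x "regime_" = true
          · have e1 : q1 x = false := by unfold q1; rw [h2']; simp
            have e2 : q2 x = false := by unfold q2; rw [h3']; simp
            have e3 : q3 x = true := by unfold q3; rw [h1', h2', h3', h4]; rfl
            have e4 : q4 x = false := by unfold q4; rw [h4]; simp
            rw [if_pos h4, ih, e1, e2, e3, e4]
            simp
          · have h4' : PySem.Str.startswith x "regime_" = false := by
              cases hc : PySem.Str.startswith x "regime_"
              · rfl
              · exact absurd hc h4
            have e1 : q1 x = false := by unfold q1; rw [h2']; simp
            have e2 : q2 x = false := by unfold q2; rw [h3']; simp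
            have e3 : q3 x = false := by unfold q3; rw [h4']; simp
            have e4 : q4 x = true := by unfold q4; rw [h1', h2', h3', h4']; rfl
            rw [if_neg h4, ih, e1, e2, e3, e4]
            simp

theorem seen_mem (xs : List String) (s : PySem.Set String) (g : String) :
    (g ∈ xs.foldl (fun t f => if (PySem.Set.ofList ncPrimary).contains f then PySem.Set.add t f else t) s) ↔
      g ∈ s ∨ (g ∈ xs ∧ g ∈ ncPrimary) := by
  induction xs generalizing s with
  | nil => simp
  | cons x t ih =>
    simp only [List.foldl_cons]
    by_cases h : (PySem.Set.ofList ncPrimary).contains x = true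
    · have hx : x ∈ ncPrimary := nc_cases x h
      rw [if_pos h, ih]
      simp only [PySem.Set.mem_add, List.mem_cons]
      constructor
      · rintro ((hs | rfl) | ht)
        · exact Or.inl hs
        · exact Or.inr ⟨Or.inl rfl, hx⟩
        · exact Or.inr ⟨Or.inr ht.1, ht.2⟩
      · rintro (hs | ⟨(rfl | ht), hnc⟩)
        · exact Or.inl (Or.inl hs)
        · exact Or.inl (Or.inr rfl)
        · exact Or.inr ⟨ht, hnc⟩
    · have hx : x ∉ ncPrimary := fun hmem =>
        h ((PySem.Set.contains_iff _ _).mpr (by simpa [PySem.Set.mem_ofList] using hmem))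
      rw [if_neg h, ih]
      constructor
      · rintro (hs | ⟨ht, hnc⟩)
        · exact Or.inl hs
        · exact Or.inr ⟨List.mem_cons_of_mem _ ht, hnc⟩
      · rintro (hs | ⟨hmem, hnc⟩)
        · exact Or.inl hs
        · rcases List.mem_cons.mp hmem with rfl | ht
          · exact absurd hnc hx
          · exact Or.inr ⟨ht, hnc⟩

theorem q1_eq (f : String) : q1 f = (f == "n_classes") := by
  unfold q1
  cases hb : (f == "n_classes") with
  | false => simp
  | true =>
    have hf : f = "n_classes" := by simpa using hb
    have h1 : (PySem.Set.ofList ncPrimary).contains f = false := by subst hf; decide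
    rw [h1]; rfl

theorem q2_eq (f : String) : q2 f = PySem.Str.startswith f "source_" := by
  unfold q2
  cases hs : PySem.Str.startswith f "source_" with
  | false => simp
  | true =>
    have h1 : (PySem.Set.ofList ncPrimary).contains f = false := by
      cases hc : (PySem.Set.ofList ncPrimary).contains f
      · rfl
      · exact absurd hs (by have hm := nc_cases f hc; fin_cases hm <;> decide)
    have h2 : (f == "n_classes") = false := by
      cases hb : (f == "n_classes")
      · rfl
      · have hf : f = "n_classes" := by simpa using hb
        subst hf; exact absurd hs (by decide)
    rw [h1, h2]; rfl

theorem src_regime_disjoint (f : String) (hr : PySem.Str.startswith f "regime_" = true) :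
    PySem.Str.startswith f "source_" = false := by
  cases hs : PySem.Str.startswith f "source_"
  · rfl
  · exfalso
    have hr' : ("regime_".toList) <+: f.toList := by
      rw [PySem.Str.startswith_eq] at hr
      exact (PySem.Chars.startswith_iff _ _).mp hr
    have hs' : ("source_".toList) <+: f.toList := by
      rw [PySem.Str.startswith_eq] at hs
      exact (PySem.Chars.startswith_iff _ _).mp hs
    rcases hr' with ⟨t1, e1⟩
    rcases hs' with ⟨t2, e2⟩
    rw [← e1] at e2
    simp at e2

theorem q3_eq (f : String) : q3 f = PySem.Str.startswith f "regime_" := by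
  unfold q3
  cases hr : PySem.Str.startswith f "regime_" with
  | false => simp
  | true =>
    have h1 : (PySem.Set.ofList ncPrimary).contains f = false := by
      cases hc : (PySem.Set.ofList ncPrimary).contains f
      · rfl
      · exact absurd hr (by have hm := nc_cases f hc; fin_cases hm <;> decide)
    have h2 : (f == "n_classes") = false := by
      cases hb : (f == "n_classes")
      · rfl
      · have hf : f = "n_classes" := by simpa using hb
        subst hf; exact absurd hr (by decide)
    have h3 : PySem.Str.startswith f "source_" = false := src_regime_disjoint f hr
    rw [h1, h2, h3]; rfl

-- Bool equality of two membership tests from an iff on the memberships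
theorem contains_congr (f : String) (l1 l2 : List String) (h : f ∈ l1 ↔ f ∈ l2) :
    PySem.Set.contains l1 f = l2.contains f := by
  simp [List.contains_eq_mem, h]

-- A's last filter, restricted to members of `present`, equals q4
theorem rest_eq (present : List String) :
    present.filter (fun f =>
      !(ncPrimary.filter (fun g => present.contains g)).contains f &&
      !(present.filter (fun g => g == "n_classes")).contains f &&
      !(PySem.Str.startswith f "source_" || PySem.Str.startswith f "regime_")) =
    present.filter q4 := by
  apply List.filter_congr
  intro f hf
  unfold q4
  have e1 : (ncPrimary.filter (fun g => present.contains g)).contains f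
      = (PySem.Set.ofList ncPrimary).contains f := by
    cases hc : (PySem.Set.ofList ncPrimary).contains f
    · have hnc : f ∉ ncPrimary := by
        intro hmem
        have hct : (PySem.Set.ofList ncPrimary).contains f = true :=
          (PySem.Set.contains_iff _ _).mpr (by simpa [PySem.Set.mem_ofList] using hmem)
        rw [hc] at hct
        cases hct
      simp only [List.contains_eq_mem, List.mem_filter]
      simp [hnc]
    · have hnc : f ∈ ncPrimary := nc_cases f hc
      simp only [List.contains_eq_mem, List.mem_filter]
      simp [hnc, hf]
  have e2 : (present.filter (fun g => g == "n_classes")).contains f = (f == "n_classes") := by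
    cases hb : (f == "n_classes")
    · simp only [List.contains_eq_mem, List.mem_filter]
      simp [hb]
    · have hfn : f = "n_classes" := by simpa using hb
      simp only [List.contains_eq_mem, List.mem_filter]
      simp [hb, hf]
  rw [e1, e2]
  cases (PySem.Set.ofList ncPrimary).contains f <;>
    cases (f == "n_classes") <;>
    cases PySem.Str.startswith f "source_" <;>
    cases PySem.Str.startswith f "regime_" <;> rfl

theorem nc_order_eq (present : List String) :
    ncPrimary.filter (fun f =>
      PySem.Set.contains
        (present.foldl (fun t f => if (PySem.Set.ofList ncPrimary).contains f then PySem.Set.add t f else t)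
          PySem.Set.empty) f) =
    ncPrimary.filter (fun f => present.contains f) := by
  apply List.filter_congr
  intro f hf
  refine contains_congr f _ _ ?_
  rw [seen_mem]
  constructor
  · rintro (hs | ⟨hp, _⟩)
    · simp [PySem.Set.empty] at hs
    · exact hp
  · intro hp
    exact Or.inr ⟨hp, hf⟩

-- ===== VERDICT (by name: the statement is the Claim_ definition above) =====
theorem order_features_spec : Claim_equal_order_features := by
  intro present _
  unfold Spec_order_features order_features order_features_alt
  dsimp only
  rw [fold_expand]
  dsimp only
  rw [List.filter_congr (fun f _ => q1_eq f), List.filter_congr (fun f _ => q2_eq f),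
      List.filter_congr (fun f _ => q3_eq f), rest_eq present, nc_order_eq present]
  simp [List.append_assoc]
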